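-- pv_equiv track=rewrite | github.com/toBeOfUse/Twitter-Archive-Browser | ArchiveAccess/DBRead.py | parse_search
-- ===== SOURCE A (Python) =====
-- import string
--
-- def parse_search(query):
--     # all punctuation is meaningless to fts5 and needs to be sanitized except for
--     # matched pairs of double quotes, which create phrases. to preserve these,
--     # the search query is split on "s before sanitization; if there are an odd
--     # number of elements after splitting, then we can join everything together on
--     # " again; if there are an even number, then there was an unmatched ", which
--     # we will arbitrarily decide was the last one and exclude. TODO: move tests
--     # for this into main test package
--     escaper = str.maketrans({x: " " for x in string.punctuation})
--     search_comps = query.split('"')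
--     parsed_search = ""
--     if len(search_comps) % 2 == 1:
--         parsed_search = '"'.join(x.translate(escaper) for x in search_comps)
--     else:
--         parsed_search = '"'.join(
--             x.translate(escaper) for x in search_comps[:-1]
--         ) + search_comps[-1].translate(escaper)
--     return parsed_search.replace('""', '" "')
-- ===== SOURCE B (Python) =====
-- import string
--
-- def parse_search(query):
--     # One stateful pass: count quotes first; keep quotes as-is except (when the
--     # total is odd) the final one, map other punctuation to spaces.
--     q = query.count('"')
--     drop = q if q % 2 == 1 else 0  # 1-based index of the quote to suppress (0 = none)
--     out = []
--     seen = 0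
--     for ch in query:
--         if ch == '"':
--             seen += 1
--             if seen != drop:
--                 out.append(ch)
--         elif ch in string.punctuation:
--             out.append(" ")
--         else:
--             out.append(ch)
--     return "".join(out).replace('""', '" "')
-- ===== Notes on version B (the rewrite author's own statement) =====
-- stated objective: alternative
-- what changed: Replaces split-on-quote / per-component translate / parity-dependent join with a single stateful character scan that keeps quotes (suppressing the final one when the quote count is odd) and maps other punctuation to spaces.
import Mathlib
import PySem

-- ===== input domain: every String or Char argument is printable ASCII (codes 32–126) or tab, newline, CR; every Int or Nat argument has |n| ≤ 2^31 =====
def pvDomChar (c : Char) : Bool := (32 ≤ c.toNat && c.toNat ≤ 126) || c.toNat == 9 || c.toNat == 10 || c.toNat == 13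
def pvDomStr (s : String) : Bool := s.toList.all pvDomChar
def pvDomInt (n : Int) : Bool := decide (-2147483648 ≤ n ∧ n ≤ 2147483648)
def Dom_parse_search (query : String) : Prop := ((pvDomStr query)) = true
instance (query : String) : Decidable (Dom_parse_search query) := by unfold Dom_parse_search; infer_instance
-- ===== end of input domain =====

-- B replaces A's split/translate/parity-join with a single stateful scan over the characters; objective: alternative (same cost).


-- membership in string.punctuation (ASCII 33-47, 58-64, 91-96, 123-126); exact on ASCII
def pvIsPunct (c : Char) : Bool :=
  (33 ≤ c.toNat && c.toNat ≤ 47) || (58 ≤ c.toNat && c.toNat ≤ 64) ||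
  (91 ≤ c.toNat && c.toNat ≤ 96) || (123 ≤ c.toNat && c.toNat ≤ 126)

-- x.translate(escaper): per-char table mapping punctuation to ' '; exact hand port
def pvTr (c : Char) : Char := if pvIsPunct c then ' ' else c

-- ===== PORT A =====
def parse_search (query : String) : String :=
  let comps := PySem.Chars.splitOn query.toList ['"']
  let parsed :=
    if comps.length % 2 == 1 then
      PySem.Chars.join ['"'] (comps.map (fun x => x.map pvTr))
    else
      PySem.Chars.join ['"'] ((PySem.List.slice comps none (some (-1))).map (fun x => x.map pvTr))
        ++ (PySem.List.pyGetD comps (-1) []).map pvTr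
  String.ofList (PySem.Chars.replace parsed ['"', '"'] ['"', ' ', '"'])

-- ===== PORT B =====
def parse_search_alt (query : String) : String :=
  let cs := query.toList
  let q := PySem.Chars.count cs ['"']
  let drop := if q % 2 == 1 then q else 0
  let res := cs.foldl (fun (acc : List Char × Nat) ch =>
      if ch = '"' then
        let seen := acc.2 + 1
        (if seen = drop then acc.1 else acc.1 ++ [ch], seen)
      else if pvIsPunct ch then (acc.1 ++ [' '], acc.2)
      else (acc.1 ++ [ch], acc.2)) ([], 0)
  String.ofList (PySem.Chars.replace res.1 ['"', '"'] ['"', ' ', '"'])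

-- ===== PRECONDITION & SPEC =====
def Spec_parse_search (query : String) (out : String) : Prop := out = parse_search_alt query
instance (query : String) (out : String) : Decidable (Spec_parse_search query out) := by unfold Spec_parse_search; infer_instance

-- ===== CLAIM (what is proved, stated in full; the proofs are below) =====
def Claim_equal_parse_search : Prop := ∀ (query : String), Dom_parse_search query → Spec_parse_search query (parse_search query)

-- ===== LEMMAS AND PROOFS =====

-- structural characterisation of splitOn on a single-char separator
def pvSplit1 (cur : List Char) : List Char → List (List Char)
  | [] => [cur.reverse]
  | c :: r => if c = '"' then cur.reverse :: pvSplit1 [] r else pvSplit1 (c :: cur) r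

theorem pvSplitOn_go_eq (fuel : Nat) (l cur : List Char) (acc : List (List Char))
    (h : l.length < fuel) :
    PySem.Chars.splitOn.go ['"'] fuel l cur acc = acc.reverse ++ pvSplit1 cur l := by
  induction fuel generalizing l cur acc with
  | zero => omega
  | succ n ih =>
    cases l with
    | nil => simp [PySem.Chars.splitOn.go, pvSplit1]
    | cons c r =>
      by_cases hc : c = '"'
      · subst hc
        rw [PySem.Chars.splitOn.go]
        simp only [List.isPrefixOf, BEq.rfl, Bool.true_and, if_true,
          List.length_singleton, List.drop_one, List.tail_cons]
        rw [ih r [] (List.reverse cur :: acc) (by simp at h ⊢; omega)]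
        simp [pvSplit1]
      · rw [PySem.Chars.splitOn.go]
        have : (['"'].isPrefixOf (c :: r)) = false := by
          simp [List.isPrefixOf]; exact fun hh => (hc hh.symm).elim
        simp only [this]
        rw [ih r (c :: cur) acc (by simp at h ⊢; omega)]
        simp [pvSplit1, hc]

theorem pvSplitOn_eq (cs : List Char) :
    PySem.Chars.splitOn cs ['"'] = pvSplit1 [] cs := by
  unfold PySem.Chars.splitOn
  rw [pvSplitOn_go_eq cs.length.succ cs [] [] (by omega)]
  simp

theorem pvCount_go_eq (fuel : Nat) (l : List Char) (acc : Nat) (h : l.length ≤ fuel) :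
    PySem.Chars.count.go ['"'] fuel l acc = acc + l.count '"' := by
  induction fuel generalizing l acc with
  | zero =>
    have : l = [] := by cases l <;> simp_all
    subst this; simp [PySem.Chars.count.go]
  | succ n ih =>
    cases l with
    | nil => simp [PySem.Chars.count.go]
    | cons c r =>
      by_cases hc : c = '"'
      · subst hc
        rw [PySem.Chars.count.go]
        simp only [List.isPrefixOf, BEq.rfl, Bool.true_and, if_true,
          List.length_singleton, List.drop_one, List.tail_cons]
        rw [ih r (acc + 1) (by simp at h ⊢; omega)]
        simp; omega
      · rw [PySem.Chars.count.go]
        have : (['"'].isPrefixOf (c :: r)) = false := by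
          simp [List.isPrefixOf]; exact fun hh => (hc hh.symm).elim
        simp only [this]
        rw [ih r acc (by simp at h ⊢; omega)]
        simp [hc]

theorem pvCount_eq (cs : List Char) : PySem.Chars.count cs ['"'] = cs.count '"' := by
  unfold PySem.Chars.count
  simp [pvCount_go_eq cs.length cs 0 (le_refl _)]

theorem pvSplit1_length (l cur : List Char) :
    (pvSplit1 cur l).length = l.count '"' + 1 := by
  induction l generalizing cur with
  | nil => simp [pvSplit1]
  | cons c r ih =>
    by_cases hc : c = '"'
    · subst hc; simp [pvSplit1, ih]
    · simp [pvSplit1, hc, ih]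

-- the head-piece/tail-pieces flattening of the original characters
def pvFlatHead : List (List Char) → List Char
  | [] => []
  | p :: ps => p ++ ps.flatMap (fun x => '"' :: x)

theorem pvFlatHead_eq (l cur : List Char) :
    pvFlatHead (pvSplit1 cur l) = cur.reverse ++ l := by
  induction l generalizing cur with
  | nil => simp [pvSplit1, pvFlatHead]
  | cons c r ih =>
    by_cases hc : c = '"'
    · subst hc
      simp only [pvSplit1, if_true]
      have h2 := ih []
      cases hs : pvSplit1 ([] : List Char) r with
      | nil =>
        have := pvSplit1_length r ([] : List Char); rw [hs] at this; simp at this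
      | cons p' ps' =>
        rw [hs] at h2
        simp [pvFlatHead] at h2 ⊢
        rw [h2]
    · simp only [pvSplit1, hc, if_false]
      rw [ih (c :: cur)]
      simp

theorem pvSplit1_quote_free (l cur : List Char) (hcur : '"' ∉ cur) :
    ∀ p ∈ pvSplit1 cur l, '"' ∉ p := by
  induction l generalizing cur with
  | nil =>
    intro p hp; simp [pvSplit1] at hp; subst hp; simp [hcur]
  | cons c r ih =>
    by_cases hc : c = '"'
    · subst hc
      intro p hp
      simp only [pvSplit1, if_true, List.mem_cons] at hp
      rcases hp with h | h
      · subst h; simp [hcur]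
      · exact ih [] (by simp) p h
    · intro p hp
      simp only [pvSplit1, hc, if_false] at hp
      exact ih (c :: cur) (by simp [hcur]; exact fun hh => hc hh.symm) p hp

-- join of translated pieces, unfolded
theorem pvJoin_map (f : List Char → List Char) (p : List Char) (ps : List (List Char)) :
    PySem.Chars.join ['"'] ((p :: ps).map f) = f p ++ ps.flatMap (fun x => '"' :: f x) := by
  induction ps generalizing p with
  | nil => simp [PySem.Chars.join_singleton]
  | cons p' ps' ih =>
    rw [List.map_cons, List.map_cons, PySem.Chars.join_cons_cons, ← List.map_cons]
    rw [ih p']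
    simp

-- B's step function and its expected output on the quote-separated tail
def pvStep (drop : Nat) (acc : List Char × Nat) (ch : Char) : List Char × Nat :=
  if ch = '"' then
    let seen := acc.2 + 1
    (if seen = drop then acc.1 else acc.1 ++ [ch], seen)
  else if pvIsPunct ch then (acc.1 ++ [' '], acc.2)
  else (acc.1 ++ [ch], acc.2)

def pvE (drop : Nat) (seen : Nat) : List (List Char) → List Char
  | [] => []
  | p :: ps => (if seen + 1 = drop then [] else ['"']) ++ p.map pvTr ++ pvE drop (seen + 1) ps

theorem pvFoldl_free (drop : Nat) (seg : List Char) (hseg : '"' ∉ seg)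
    (out : List Char) (seen : Nat) :
    seg.foldl (pvStep drop) (out, seen) = (out ++ seg.map pvTr, seen) := by
  induction seg generalizing out with
  | nil => simp
  | cons c r ih =>
    have hc : c ≠ '"' := by intro h; exact hseg (h ▸ List.mem_cons_self ..)
    have hr : '"' ∉ r := fun h => hseg (List.mem_cons_of_mem _ h)
    simp only [List.foldl_cons]
    by_cases hp : pvIsPunct c
    · rw [show pvStep drop (out, seen) c = (out ++ [' '], seen) by simp [pvStep, hc, hp]]
      rw [ih hr]
      simp [pvTr, hp]
    · rw [show pvStep drop (out, seen) c = (out ++ [c], seen) by simp [pvStep, hc, hp]]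
      rw [ih hr]
      simp [pvTr, hp]

theorem pvFoldl_tail (drop : Nat) (ps : List (List Char)) (hps : ∀ p ∈ ps, '"' ∉ p)
    (out : List Char) (seen : Nat) :
    (ps.flatMap (fun x => '"' :: x)).foldl (pvStep drop) (out, seen)
      = (out ++ pvE drop seen ps, seen + ps.length) := by
  induction ps generalizing out seen with
  | nil => simp [pvE]
  | cons p ps' ih =>
    simp only [List.flatMap_cons, List.foldl_append, List.foldl_cons]
    rw [show pvStep drop (out, seen) '"'
        = (if seen + 1 = drop then out else out ++ ['"'], seen + 1) by simp [pvStep]]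
    rw [pvFoldl_free drop p (hps p (List.mem_cons_self ..)) _ _]
    rw [ih (fun x hx => hps x (List.mem_cons_of_mem _ hx))]
    by_cases h : seen + 1 = drop <;> simp [pvE, h] <;> omega

theorem pvE_zero (seen : Nat) (ps : List (List Char)) :
    pvE 0 seen ps = ps.flatMap (fun x => '"' :: x.map pvTr) := by
  induction ps generalizing seen with
  | nil => simp [pvE]
  | cons p ps' ih => simp [pvE, ih]

theorem pvE_last (ps : List (List Char)) (h : ps ≠ []) (seen : Nat) :
    pvE (seen + ps.length) seen ps
      = ps.dropLast.flatMap (fun x => '"' :: x.map pvTr) ++ (ps.getLast h).map pvTr := by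
  induction ps generalizing seen with
  | nil => exact (h rfl).elim
  | cons p ps' ih =>
    cases ps' with
    | nil => simp [pvE]
    | cons p' ps'' =>
      have hne : (p' :: ps'') ≠ [] := by simp
      have hlen : seen + (p :: p' :: ps'').length = (seen + 1) + (p' :: ps'').length := by
        simp; omega
      rw [pvE, hlen, ih hne (seen + 1)]
      have : seen + 1 ≠ (seen + 1) + (p' :: ps'').length := by simp
      rw [← hlen] at this
      simp [List.getLast]

-- the two pre-replace strings agree
theorem pvMain (cs : List Char) :
    (let comps := PySem.Chars.splitOn cs ['"']
     if comps.length % 2 == 1 then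
       PySem.Chars.join ['"'] (comps.map (fun x => x.map pvTr))
     else
       PySem.Chars.join ['"'] ((PySem.List.slice comps none (some (-1))).map (fun x => x.map pvTr))
         ++ (PySem.List.pyGetD comps (-1) []).map pvTr)
    = (let q := PySem.Chars.count cs ['"']
       let drop := if q % 2 == 1 then q else 0
       (cs.foldl (fun (acc : List Char × Nat) ch =>
          if ch = '"' then
            let seen := acc.2 + 1
            (if seen = drop then acc.1 else acc.1 ++ [ch], seen)
          else if pvIsPunct ch then (acc.1 ++ [' '], acc.2)
          else (acc.1 ++ [ch], acc.2)) ([], 0)).1) := by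
  simp only [pvSplitOn_eq, pvCount_eq]
  cases hs : pvSplit1 ([] : List Char) cs with
  | nil =>
    have := pvSplit1_length cs ([] : List Char); rw [hs] at this; simp at this
  | cons p ps =>
    have hlen : cs.count '"' = ps.length := by
      have := pvSplit1_length cs ([] : List Char); rw [hs] at this; simp at this; omega
    have hfree : ∀ x ∈ p :: ps, '"' ∉ x := by
      rw [← hs]; exact pvSplit1_quote_free cs [] (by simp)
    have hcs : cs = p ++ ps.flatMap (fun x => '"' :: x) := by
      have := pvFlatHead_eq cs ([] : List Char); rw [hs] at this
      simpa [pvFlatHead] using this.symm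
    have hfold : ∀ drop : Nat,
        (cs.foldl (pvStep drop) ([], 0)) = (p.map pvTr ++ pvE drop 0 ps, ps.length) := by
      intro drop
      rw [hcs, List.foldl_append,
        pvFoldl_free drop p (hfree p (List.mem_cons_self ..)) [] 0,
        pvFoldl_tail drop ps (fun x hx => hfree x (List.mem_cons_of_mem _ hx))]
      simp
    simp only [hlen]
    show _ = (cs.foldl (pvStep (if ps.length % 2 == 1 then ps.length else 0)) ([], 0)).1
    by_cases hpar : ps.length % 2 = 1
    · -- odd number of quotes: comps has even length; A drops the last quote
      have hps : ps ≠ [] := by intro h; subst h; simp at hpar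
      have hc1 : ((p :: ps).length % 2 == 1) = false := by
        simp [List.length_cons]; omega
      simp only [hc1, Bool.false_eq_true, if_false]
      rw [show (if ps.length % 2 == 1 then ps.length else 0) = ps.length by simp [hpar]]
      rw [hfold ps.length]
      rw [PySem.List.slice_to_neg_one, PySem.List.pyGetD_neg_one (p :: ps) [] (by simp)]
      have hdl : (p :: ps).dropLast = p :: ps.dropLast := by
        cases ps with | nil => exact (hps rfl).elim | cons a b => simp
      rw [hdl, pvJoin_map, List.getLast_cons hps]
      have := pvE_last ps hps 0
      simp only [Nat.zero_add] at this
      rw [this]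
      simp
    · -- even number of quotes: nothing is dropped
      have hc1 : ((p :: ps).length % 2 == 1) = true := by
        simp [List.length_cons]; omega
      simp only [hc1, if_true]
      rw [show (if ps.length % 2 == 1 then ps.length else 0) = 0 by simp [hpar]]
      rw [hfold 0, pvJoin_map, pvE_zero]

-- ===== VERDICT (by name: the statement is the Claim_ definition above) =====
theorem parse_search_spec : Claim_equal_parse_search := by
  intro query _
  unfold Spec_parse_search parse_search parse_search_alt
  have h := pvMain query.toList
  simp only at h
  exact congrArg (fun x => String.ofList (PySem.Chars.replace x ['"', '"'] ['"', ' ', '"'])) h
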